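-- pv_equiv track=rewrite | github.com/HawzhinBlanca/NanoDesigner | api/app/services/security_scanner.py | _is_acceptable_mime_mismatch
-- ===== SOURCE A (Python) =====
-- def _is_acceptable_mime_mismatch(declared: str, actual: str) -> bool:
--     """Check if MIME mismatch is acceptable.
--
--     Some mismatches are acceptable, like:
--     - text/plain vs text/html (HTML can be plain text)
--     - image/jpg vs image/jpeg (synonym)
--     """
--     acceptable_pairs = [
--         ("text/plain", "text/html"),
--         ("image/jpg", "image/jpeg"),
--         ("application/octet-stream", actual),  # Generic binary can be anything
--     ]
--
--     for pair in acceptable_pairs: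
--         if (declared, actual) == pair or (actual, declared) == pair:
--             return True
--
--     return False
-- ===== SOURCE B (Python) =====
-- # Canonical-form approach: map each MIME type to a canonical synonym, then
-- # compare canonical forms (a declared generic binary is accepted outright).
-- _CANONICAL = {
--     "text/html": "text/plain",   # HTML can be plain text
--     "image/jpg": "image/jpeg",   # synonym
-- }
--
-- def _is_acceptable_mime_mismatch(declared: str, actual: str) -> bool:
--     """Check if MIME mismatch is acceptable."""
--     if declared == "application/octet-stream":
--         return True
--     # Distinct types are acceptable exactly when they normalise to the same
--     # canonical type.
--     return declared != actual and \
--         _CANONICAL.get(declared, declared) == _CANONICAL.get(actual, actual)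
-- ===== Notes on version B (the rewrite author's own statement) =====
-- stated objective: simpler
-- what changed: Replaces the loop that tries each constant pair in both orientations by a normalise-then-compare scheme: a canonicalisation dict maps each synonym to its canonical MIME type, and two distinct types are acceptable iff their canonical forms coincide (with one guard for a declared generic binary).
import Mathlib
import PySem

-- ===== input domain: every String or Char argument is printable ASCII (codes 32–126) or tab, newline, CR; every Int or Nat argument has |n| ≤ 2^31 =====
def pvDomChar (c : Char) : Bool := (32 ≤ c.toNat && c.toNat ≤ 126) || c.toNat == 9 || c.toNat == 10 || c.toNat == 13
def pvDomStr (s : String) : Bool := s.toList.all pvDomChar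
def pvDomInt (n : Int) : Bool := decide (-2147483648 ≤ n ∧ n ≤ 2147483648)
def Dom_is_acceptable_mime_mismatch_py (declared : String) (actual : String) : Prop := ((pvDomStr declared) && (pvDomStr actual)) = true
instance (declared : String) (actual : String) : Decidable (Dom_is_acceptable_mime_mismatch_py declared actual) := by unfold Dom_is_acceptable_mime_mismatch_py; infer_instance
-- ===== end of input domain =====

-- B replaces the both-orderings pair loop by canonicalisation (dict-normalise each type, then compare canonical forms); objective: simpler.


-- ===== PORT A =====
def is_acceptable_mime_mismatch_py (declared : String) (actual : String) : Bool :=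
  let acceptable_pairs : List (String × String) :=
    [("text/plain", "text/html"),
     ("image/jpg", "image/jpeg"),
     ("application/octet-stream", actual)]
  -- 'for pair in acceptable_pairs: if …: return True' / 'return False'
  acceptable_pairs.any (fun pair => ((declared, actual) == pair) || ((actual, declared) == pair))

-- ===== PORT B =====
def pvCanonical : PySem.Dict String String :=
  PySem.Dict.mk [("text/html", "text/plain"), ("image/jpg", "image/jpeg")]

def is_acceptable_mime_mismatch_py_alt (declared : String) (actual : String) : Bool :=
  if declared == "application/octet-stream" then true
  else
    (declared != actual) &&
      (PySem.Dict.getD pvCanonical declared declared ==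
       PySem.Dict.getD pvCanonical actual actual)

-- ===== PRECONDITION & SPEC =====
def Spec_is_acceptable_mime_mismatch_py (declared : String) (actual : String) (out : Bool) : Prop := out = is_acceptable_mime_mismatch_py_alt declared actual
instance (declared : String) (actual : String) (out : Bool) : Decidable (Spec_is_acceptable_mime_mismatch_py declared actual out) := by unfold Spec_is_acceptable_mime_mismatch_py; infer_instance

-- ===== CLAIM =====
def Claim_equal_is_acceptable_mime_mismatch_py : Prop := ∀ (declared : String) (actual : String), Dom_is_acceptable_mime_mismatch_py declared actual → Spec_is_acceptable_mime_mismatch_py declared actual (is_acceptable_mime_mismatch_py declared actual)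

-- ===== LEMMAS AND PROOFS =====

theorem pv_canon_getD (s : String) :
    PySem.Dict.getD pvCanonical s s =
      if s = "text/html" then "text/plain"
      else if s = "image/jpg" then "image/jpeg" else s := by
  by_cases h1 : s = "text/html"
  · subst h1; decide
  · by_cases h2 : s = "image/jpg"
    · subst h2; decide
    · rw [if_neg h1, if_neg h2, PySem.Dict.getD_of_not_contains]
      simp [pvCanonical]
      exact ⟨fun h => h1 h.symm, fun h => h2 h.symm⟩

-- ===== VERDICT =====
theorem is_acceptable_mime_mismatch_py_spec : Claim_equal_is_acceptable_mime_mismatch_py := by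
  intro declared actual _
  unfold Spec_is_acceptable_mime_mismatch_py is_acceptable_mime_mismatch_py is_acceptable_mime_mismatch_py_alt
  simp only [List.any_cons, List.any_nil, Bool.or_false, pv_canon_getD]
  by_cases hd : declared = "application/octet-stream"
  · simp [hd]
  · rw [if_neg (by simp [hd])]
    rw [Bool.eq_iff_iff]
    by_cases h0 : declared = actual
    · subst h0
      simp_all [Prod.ext_iff]
    · by_cases h1 : declared = "text/html" <;> by_cases h2 : declared = "image/jpg" <;>
      by_cases h5 : actual = "text/html" <;> by_cases h6 : actual = "image/jpg" <;>
        simp_all [Prod.ext_iff] <;> tauto
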